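-- pv_equiv track=rewrite | github.com/StarsExpress/LeetCode-Repository | stack/subarray_max_sum.py | sum_subarray_max
-- ===== SOURCE A (Python) =====
-- def sum_subarray_max(numbers: list[int]) -> int:
--     # Format: [number, non-losing count, sum of max of subarrays ending at this number].
--     stack: list[list[int]] = []
--     subarray_max_sum = 0
--     for number in numbers:
--         non_losing_count = 1  # Number itself.
--         while stack and stack[-1][0] <= number:
--             non_losing_count += stack[-1][1]
--             subarray_max_sum += stack.pop(-1)[2]
--
--         last_losing_sum = stack[-1][2] if stack else 0
--         stack.append([number, non_losing_count, number * non_losing_count + last_losing_sum])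
--
--     return subarray_max_sum + sum(max_sum for _, _, max_sum in stack)
-- ===== SOURCE B (Python) =====
-- def sum_subarray_max(numbers: list[int]) -> int:
--     total = 0
--     maxima = []  # maxima[i] = max of numbers[i:j+1] for the current index j
--     for x in numbers:
--         maxima = [max(m, x) for m in maxima] + [x]
--         total += sum(maxima)
--     return total
-- ===== Notes on version B (the rewrite author's own statement) =====
-- stated objective: simpler
-- what changed: Replaces the monotonic stack with per-step count/prefix-sum bookkeeping by a plain list of running maxima of all subarrays ending at the current index, summed each step.
import Mathlib
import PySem

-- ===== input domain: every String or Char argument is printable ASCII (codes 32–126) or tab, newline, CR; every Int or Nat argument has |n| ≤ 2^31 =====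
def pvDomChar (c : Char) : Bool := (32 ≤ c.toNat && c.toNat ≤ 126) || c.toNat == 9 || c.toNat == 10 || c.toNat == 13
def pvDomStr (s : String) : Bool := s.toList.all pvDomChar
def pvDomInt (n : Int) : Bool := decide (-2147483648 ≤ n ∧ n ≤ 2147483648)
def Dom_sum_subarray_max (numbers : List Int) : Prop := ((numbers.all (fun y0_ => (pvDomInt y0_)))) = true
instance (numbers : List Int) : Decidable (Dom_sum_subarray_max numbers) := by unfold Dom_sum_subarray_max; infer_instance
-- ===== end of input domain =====

-- B replaces A's monotonic stack by a plain list of running maxima of subarrays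
-- ending at the current index (simpler, not faster).

-- ===== PORT A =====
-- the inner `while stack and stack[-1][0] <= number` pop loop; stack is head-first (head = top)
def pvPopA (x : Int) : List (Int × Int × Int) → Int → Int → (List (Int × Int × Int) × Int × Int)
  | [], c, acc => ([], c, acc)
  | (v, cnt, ms) :: rest, c, acc =>
    if v ≤ x then pvPopA x rest (c + cnt) (acc + ms)
    else ((v, cnt, ms) :: rest, c, acc)

-- `stack[-1][2] if stack else 0`
def pvTopS : List (Int × Int × Int) → Int
  | [] => 0
  | (_, _, s) :: _ => s

-- one iteration of A's for-loop
def pvStepA (st : List (Int × Int × Int) × Int) (x : Int) : List (Int × Int × Int) × Int :=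
  let r := pvPopA x st.1 1 st.2
  ((x, r.2.1, x * r.2.1 + pvTopS r.1) :: r.1, r.2.2)

def sum_subarray_max (numbers : List Int) : Int :=
  let fin := numbers.foldl pvStepA ([], 0)
  fin.2 + ((fin.1.reverse.map (fun e => e.2.2)).sum)

-- ===== PORT B =====
-- one iteration of B's for-loop: update the running maxima, add their sum
def pvStepB (st : Int × List Int) (x : Int) : Int × List Int :=
  let ms := st.2.map (fun m => max m x) ++ [x]
  (st.1 + ms.sum, ms)

def sum_subarray_max_alt (numbers : List Int) : Int :=
  (numbers.foldl pvStepB (0, [])).1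

-- ===== PRECONDITION & SPEC =====
def Spec_sum_subarray_max (numbers : List Int) (out : Int) : Prop := out = sum_subarray_max_alt numbers
instance (numbers : List Int) (out : Int) : Decidable (Spec_sum_subarray_max numbers out) := by unfold Spec_sum_subarray_max; infer_instance

-- ===== CLAIM (what is proved, stated in full; the proofs are below) =====
def Claim_equal_sum_subarray_max : Prop := ∀ (numbers : List Int), Dom_sum_subarray_max numbers → Spec_sum_subarray_max numbers (sum_subarray_max numbers)

-- ===== LEMMAS AND PROOFS =====

-- the multiset of running maxima a stack represents: bottom-to-top, v repeated cnt times
def pvBlocks (S : List (Int × Int × Int)) : List Int :=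
  S.reverse.flatMap (fun e => List.replicate e.2.1.toNat e.1)

def pvSSum (S : List (Int × Int × Int)) : Int := (S.map (fun e => e.2.2)).sum

-- stack invariant: positive counts, s-fields are prefix sums of v*cnt, values strictly increase downward
def pvInv : List (Int × Int × Int) → Prop
  | [] => True
  | (v, c, s) :: rest =>
      0 < c ∧ s = v * c + pvTopS rest ∧
      (match rest with | [] => True | (v', _, _) :: _ => v < v') ∧ pvInv rest

theorem pvBlocks_cons (e : Int × Int × Int) (S : List (Int × Int × Int)) :
    pvBlocks (e :: S) = pvBlocks S ++ List.replicate e.2.1.toNat e.1 := by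
  simp [pvBlocks]

theorem pvTopS_eq_sum_blocks : ∀ S : List (Int × Int × Int), pvInv S →
    pvTopS S = (pvBlocks S).sum := by
  intro S
  induction S with
  | nil => intro _; simp [pvTopS, pvBlocks]
  | cons e rest ih =>
    intro h
    obtain ⟨v, c, s⟩ := e
    obtain ⟨hc, hs, _, hrest⟩ := h
    have : ((c.toNat : Int)) = c := Int.toNat_of_nonneg (le_of_lt hc)
    simp only [pvBlocks_cons, List.sum_append, List.sum_replicate, nsmul_eq_mul, pvTopS]
    rw [hs, ih hrest, this]
    ring

theorem pvSum_cnt_nonneg : ∀ L : List (Int × Int × Int), (∀ e ∈ L, 0 < e.2.1) →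
    0 ≤ (L.map (fun e => e.2.1)).sum := by
  intro L
  induction L with
  | nil => intro _; simp
  | cons e rest ih =>
    intro h
    simp only [List.map_cons, List.sum_cons]
    have h1 := h e (by simp)
    have h2 := ih (fun e he => h e (by simp [he]))
    omega

-- flattening a stack segment whose values are all ≤ x and mapping max · x gives a block of x's
theorem pvMapMax_flat (x : Int) : ∀ L : List (Int × Int × Int),
    (∀ e ∈ L, e.1 ≤ x ∧ 0 < e.2.1) →
    ((L.flatMap (fun e => List.replicate e.2.1.toNat e.1)).map (fun m => max m x))
      = List.replicate ((L.map (fun e : Int × Int × Int => e.2.1)).sum).toNat x := by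
  intro L
  induction L with
  | nil => intro _; simp
  | cons e rest ih =>
    intro h
    obtain ⟨hle, hpos⟩ := h e (by simp)
    have hrest := ih (fun e he => h e (by simp [he]))
    have hnn := pvSum_cnt_nonneg rest (fun e he => (h e (by simp [he])).2)
    simp only [List.flatMap_cons, List.map_append, List.map_replicate, hrest]
    have hmax : max e.1 x = x := max_eq_right hle
    rw [hmax, ← List.replicate_add]
    congr 1
    simp only [List.map_cons, List.sum_cons]
    omega

theorem pvBlocks_gt (x : Int) : ∀ S : List (Int × Int × Int), pvInv S →
    (match S with | [] => True | (v', _, _) :: _ => x < v') →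
    ∀ m ∈ pvBlocks S, x < m := by
  intro S
  induction S with
  | nil => intro _ _ m hm; simp [pvBlocks] at hm
  | cons e rest ih =>
    intro hinv hhd m hm
    obtain ⟨v, c, s⟩ := e
    obtain ⟨hc, hs, hchain, hrest⟩ := hinv
    rw [pvBlocks_cons] at hm
    rcases List.mem_append.1 hm with hm | hm
    · refine ih hrest ?_ m hm
      cases rest with
      | nil => trivial
      | cons e' r' =>
        obtain ⟨v', c', s'⟩ := e'
        exact lt_trans hhd hchain
    · have := List.eq_of_mem_replicate hm
      subst this; exact hhd

-- the pop loop: splits S into a popped prefix (all ≤ x) and a kept suffix whose top is > x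
theorem pvPopA_spec (x : Int) : ∀ (S : List (Int × Int × Int)) (c acc : Int), pvInv S →
    ∃ P, S = P ++ (pvPopA x S c acc).1 ∧
      (∀ e ∈ P, e.1 ≤ x ∧ 0 < e.2.1) ∧
      (pvPopA x S c acc).2.1 = c + (P.map (fun e => e.2.1)).sum ∧
      (pvPopA x S c acc).2.2 = acc + (P.map (fun e => e.2.2)).sum ∧
      pvInv (pvPopA x S c acc).1 ∧
      (match (pvPopA x S c acc).1 with | [] => True | (v', _, _) :: _ => x < v') := by
  intro S
  induction S with
  | nil => intro c acc _; exact ⟨[], by simp [pvPopA], by simp, by simp [pvPopA], by simp [pvPopA], trivial, trivial⟩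
  | cons e rest ih =>
    intro c acc hinv
    obtain ⟨v, cnt, ms⟩ := e
    obtain ⟨hc, hs, hchain, hrest⟩ := hinv
    by_cases hle : v ≤ x
    · obtain ⟨P, hsplit, hP, hcnt, hacc, hkinv, hktop⟩ := ih (c + cnt) (acc + ms) hrest
      refine ⟨(v, cnt, ms) :: P, ?_, ?_, ?_, ?_, ?_, ?_⟩
      · simp only [pvPopA, if_pos hle]; rw [List.cons_append, ← hsplit]
      · intro e he
        rcases List.mem_cons.1 he with he | he
        · subst he; exact ⟨hle, hc⟩
        · exact hP e he
      · simp only [pvPopA, if_pos hle, hcnt, List.map_cons, List.sum_cons]; ring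
      · simp only [pvPopA, if_pos hle, hacc, List.map_cons, List.sum_cons]; ring
      · simpa only [pvPopA, if_pos hle] using hkinv
      · simpa only [pvPopA, if_pos hle] using hktop
    · refine ⟨[], by simp [pvPopA, if_neg hle], by simp, by simp [pvPopA, if_neg hle],
        by simp [pvPopA, if_neg hle], ?_, ?_⟩
      · simpa only [pvPopA, if_neg hle] using (⟨hc, hs, hchain, hrest⟩ : pvInv ((v, cnt, ms) :: rest))
      · simp only [pvPopA, if_neg hle]; omega

-- main loop invariant: A's state (S, acc) and B's state (total, ms) stay linked
theorem pvMain : ∀ (xs : List Int) (S : List (Int × Int × Int)) (acc total : Int) (ms : List Int),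
    pvInv S → pvBlocks S = ms → total = acc + pvSSum S →
    (xs.foldl pvStepA (S, acc)).2 + pvSSum (xs.foldl pvStepA (S, acc)).1
      = (xs.foldl pvStepB (total, ms)).1 := by
  intro xs
  induction xs with
  | nil => intro S acc total ms _ _ htot; simp [List.foldl]; omega
  | cons x xs ih =>
    intro S acc total ms hinv hblocks htot
    obtain ⟨P, hsplit, hP, hcnt, hacc, hkinv, hktop⟩ := pvPopA_spec x S 1 acc hinv
    set r := pvPopA x S 1 acc with hr
    set c' : Int := r.2.1 with hc'
    set s' : Int := x * c' + pvTopS r.1 with hs'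
    have hPpos : ∀ e ∈ P, 0 < e.2.1 := fun e he => (hP e he).2
    have hsumnn := pvSum_cnt_nonneg P hPpos
    have hcpos : 0 < c' := by omega
    -- the new stack satisfies the invariant
    have hinv' : pvInv ((x, c', s') :: r.1) := by
      refine ⟨hcpos, hs', ?_, hkinv⟩
      cases hre : r.1 with
      | nil => trivial
      | cons e' rest' =>
        obtain ⟨v', cv', sv'⟩ := e'
        have := hktop; rw [hre] at this; exact this
    -- the new blocks are exactly B's new running-maxima list
    have hblocks' : pvBlocks ((x, c', s') :: r.1) = ms.map (fun m => max m x) ++ [x] := by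
      rw [pvBlocks_cons, ← hblocks, hsplit]
      have hrev : pvBlocks (P ++ r.1) = pvBlocks r.1 ++ P.reverse.flatMap (fun e => List.replicate e.2.1.toNat e.1) := by
        simp [pvBlocks, List.reverse_append]
      rw [hrev, List.map_append]
      have hid : (pvBlocks r.1).map (fun m => max m x) = pvBlocks r.1 := by
        conv_rhs => rw [← List.map_id (pvBlocks r.1)]
        apply List.map_congr_left
        intro m hm
        exact max_eq_left (le_of_lt (pvBlocks_gt x r.1 hkinv hktop m hm))
      have hPrev : ∀ e ∈ P.reverse, e.1 ≤ x ∧ 0 < e.2.1 := by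
        intro e he; exact hP e (List.mem_reverse.1 he)
      have hflat := pvMapMax_flat x P.reverse hPrev
      rw [hid, hflat]
      have hsumrev : (P.reverse.map (fun e => e.2.1)).sum = (P.map (fun e => e.2.1)).sum := by
        rw [List.map_reverse, List.sum_reverse]
      rw [hsumrev, List.append_assoc]
      congr 1
      have hct : c'.toNat = ((P.map (fun e : Int × Int × Int => e.2.1)).sum).toNat + 1 := by
        omega
      simp [hct, List.replicate_succ']
    -- B adds the sum of the new maxima; that sum is exactly s'
    have hssum : (ms.map (fun m => max m x) ++ [x]).sum = s' := by
      rw [← hblocks']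
      rw [pvBlocks_cons]
      simp only [List.sum_append, List.sum_replicate, nsmul_eq_mul]
      rw [← pvTopS_eq_sum_blocks r.1 hkinv, hs']
      have : ((c'.toNat : Int)) = c' := Int.toNat_of_nonneg (le_of_lt hcpos)
      rw [this]; ring
    have hssplit : pvSSum S = (P.map (fun e => e.2.2)).sum + pvSSum r.1 := by
      rw [hsplit]; simp [pvSSum]
    have htot' : total + (ms.map (fun m => max m x) ++ [x]).sum
        = r.2.2 + pvSSum ((x, c', s') :: r.1) := by
      rw [hssum, htot, hacc, hssplit]
      simp [pvSSum]; ring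
    have hA : (x :: xs).foldl pvStepA (S, acc) = xs.foldl pvStepA ((x, c', s') :: r.1, r.2.2) := by
      simp only [List.foldl_cons, pvStepA]; rfl
    have hB : (x :: xs).foldl pvStepB (total, ms)
        = xs.foldl pvStepB (total + (ms.map (fun m => max m x) ++ [x]).sum, ms.map (fun m => max m x) ++ [x]) := by
      simp only [List.foldl_cons, pvStepB]
    rw [hA, hB]
    exact ih _ _ _ _ hinv' hblocks' htot'

theorem pvSSum_rev (S : List (Int × Int × Int)) :
    ((S.reverse.map (fun e => e.2.2)).sum) = pvSSum S := by
  rw [List.map_reverse, List.sum_reverse, pvSSum]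

-- ===== VERDICT (by name: the statement is the Claim_ definition above) =====
theorem sum_subarray_max_spec : Claim_equal_sum_subarray_max := by
  intro numbers _
  unfold Spec_sum_subarray_max sum_subarray_max sum_subarray_max_alt
  simp only [pvSSum_rev]
  exact pvMain numbers [] 0 0 [] trivial (by simp [pvBlocks]) (by simp [pvSSum])
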